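-- pv_equiv track=rewrite | github.com/rayapetkova/University_Programming | 1. First year/01_semester/seminar_exercises/03_exercise/05_task.py | calculate_nums
-- ===== SOURCE A (Python) =====
-- def calculate_nums(list_1, list_2):
--     final_result = 0
--     shorter_list = list_1 if len(list_1) < len(list_2) else list_2
--     longer_list = list_1 if len(list_1) >= len(list_2) else list_2
--
--     difference = len(longer_list) - len(shorter_list)
--
--     if difference:
--         additional_elements = shorter_list[:difference]
--         shorter_list += additional_elements
--
--     for i in range(len(shorter_list)):
--         final_result += shorter_list[0] * longer_list[0]
--
--         del shorter_list[0]
--         del longer_list[0]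
--
--     return final_result
-- ===== SOURCE B (Python) =====
-- def calculate_nums(list_1, list_2):
--     # One O(n) pass: pad the shorter list with its own prefix, then a plain
--     # dot product via zip -- no front deletions, no argument mutation
--     # (A mutates its arguments in place; only the return value is matched).
--     if len(list_1) <= len(list_2):
--         s, l = list_1, list_2
--     else:
--         s, l = list_2, list_1
--     padded = s + s[:len(l) - len(s)]
--     return sum(x * y for x, y in zip(padded, l))
-- ===== Notes on version B (the rewrite author's own statement) =====
-- stated objective: faster
-- what changed: Replaces the loop that repeatedly deletes the front element of both lists (each del is O(n)) with a single zip-based dot product over the prefix-padded shorter list.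
import Mathlib
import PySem

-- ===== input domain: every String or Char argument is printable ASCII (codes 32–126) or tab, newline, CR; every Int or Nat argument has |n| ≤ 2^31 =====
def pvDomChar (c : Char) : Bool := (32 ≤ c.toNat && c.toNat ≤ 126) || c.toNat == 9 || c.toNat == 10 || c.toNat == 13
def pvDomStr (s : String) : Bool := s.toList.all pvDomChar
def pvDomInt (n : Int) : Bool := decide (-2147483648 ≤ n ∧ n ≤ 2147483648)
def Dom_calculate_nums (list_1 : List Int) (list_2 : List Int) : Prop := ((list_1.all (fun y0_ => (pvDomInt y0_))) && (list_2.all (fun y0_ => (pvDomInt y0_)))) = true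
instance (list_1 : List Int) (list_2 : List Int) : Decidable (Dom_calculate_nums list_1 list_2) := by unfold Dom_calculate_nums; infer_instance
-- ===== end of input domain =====

-- B replaces A's quadratic front-deletion loop by one linear zip pass over the prefix-padded shorter list; return value only (A mutates its arguments in place).

-- ===== PORT A =====
-- loop 'for i in range(len(shorter_list)): final_result += shorter[0]*longer[0]; del shorter[0]; del longer[0]'
-- (headD 0 is x[0]; the default is never reached since the loop runs only while both lists are nonempty)
def calcA_loop (n : Nat) (shorter longer : List Int) (r : Int) : Int :=
  match n with
  | 0 => r
  | n + 1 => calcA_loop n (shorter.drop 1) (longer.drop 1) (r + shorter.headD 0 * longer.headD 0)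

def calculate_nums (list_1 : List Int) (list_2 : List Int) : Int :=
  let shorter := if list_1.length < list_2.length then list_1 else list_2
  let longer := if list_1.length ≥ list_2.length then list_1 else list_2
  -- difference = len(longer) - len(shorter): nonnegative here, so Nat subtraction is exact
  let difference := longer.length - shorter.length
  -- shorter[:difference] with difference ≥ 0 is take
  let shorter := if difference ≠ 0 then shorter ++ shorter.take difference else shorter
  calcA_loop shorter.length shorter longer 0

-- ===== PORT B =====
def calculate_nums_alt (list_1 : List Int) (list_2 : List Int) : Int :=
  let p := if list_1.length ≤ list_2.length then (list_1, list_2) else (list_2, list_1)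
  let padded := p.1 ++ p.1.take (p.2.length - p.1.length)
  (List.zipWith (· * ·) padded p.2).sum

-- ===== PRECONDITION & SPEC =====
def Spec_calculate_nums (list_1 : List Int) (list_2 : List Int) (out : Int) : Prop := out = calculate_nums_alt list_1 list_2
instance (list_1 : List Int) (list_2 : List Int) (out : Int) : Decidable (Spec_calculate_nums list_1 list_2 out) := by unfold Spec_calculate_nums; infer_instance

-- ===== CLAIM (what is proved, stated in full; the proofs are below) =====
def Claim_equal_calculate_nums : Prop := ∀ (list_1 : List Int) (list_2 : List Int), Dom_calculate_nums list_1 list_2 → Spec_calculate_nums list_1 list_2 (calculate_nums list_1 list_2)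

-- ===== LEMMAS AND PROOFS =====
theorem calcA_loop_eq (s : List Int) : ∀ (l : List Int) (r : Int), s.length ≤ l.length →
    calcA_loop s.length s l r = r + (List.zipWith (· * ·) s l).sum := by
  induction s with
  | nil => intro l r _; simp [calcA_loop]
  | cons a s ih =>
    intro l r h
    cases l with
    | nil => simp at h
    | cons b l =>
      have h' : s.length ≤ l.length := by simpa using h
      show calcA_loop s.length s l (r + a * b) = _
      rw [ih l (r + a * b) h']
      simp; ring

theorem pad_if (s : List Int) (d : Nat) :
    (if d ≠ 0 then s ++ s.take d else s) = s ++ s.take d := by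
  split_ifs with h
  · rfl
  · simp [show d = 0 by omega]

theorem zipWith_mul_comm (a : List Int) : ∀ b : List Int,
    List.zipWith (· * ·) a b = List.zipWith (· * ·) b a := by
  induction a with
  | nil => intro b; cases b <;> simp
  | cons x a ih =>
    intro b
    cases b with
    | nil => simp
    | cons y b => simp [ih, mul_comm]

theorem A_eq_sum (s l : List Int) (h : s.length ≤ l.length) :
    calcA_loop (s ++ s.take (l.length - s.length)).length (s ++ s.take (l.length - s.length)) l 0
      = (List.zipWith (· * ·) (s ++ s.take (l.length - s.length)) l).sum := by
  have hlen : (s ++ s.take (l.length - s.length)).length ≤ l.length := by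
    simp [List.length_append, List.length_take]; omega
  simpa using calcA_loop_eq _ l 0 hlen

-- ===== VERDICT (by name: the statement is the Claim_ definition above) =====
theorem calculate_nums_spec : Claim_equal_calculate_nums := by
  intro list_1 list_2 _
  show calculate_nums list_1 list_2 = calculate_nums_alt list_1 list_2
  unfold calculate_nums calculate_nums_alt
  by_cases h : list_1.length < list_2.length
  · have h2 : list_1.length ≤ list_2.length := le_of_lt h
    simp only [if_pos h, if_neg (not_le.mpr h), if_pos h2, pad_if]
    exact A_eq_sum list_1 list_2 h2
  · have h2 : list_2.length ≤ list_1.length := le_of_not_gt h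
    have hge : list_1.length ≥ list_2.length := h2
    simp only [if_neg h, if_pos hge, pad_if]
    by_cases he : list_1.length ≤ list_2.length
    · have heq : list_1.length = list_2.length := le_antisymm he h2
      simp only [if_pos he]
      rw [A_eq_sum list_2 list_1 h2]
      simp [heq, zipWith_mul_comm]
    · simp only [if_neg he]
      exact A_eq_sum list_2 list_1 h2
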